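-- pv_equiv track=rewrite | github.com/AllenAnZifeng/leetcode | Past interview Questions/Citadel/OrderBook.py | bs_smaller_than_val
-- ===== SOURCE A (Python) =====
-- def bs_smaller_than_val(arr,val):
--     l, r = 0, len(arr) - 1
--     res = r
--     while l <= r:
--         m = (l + r) // 2
--         if arr[m] >= val:
--             r = m -1
--             res = r
--         else:
--             l = m+1
--     return res
-- ===== SOURCE B (Python) =====
-- def bs_smaller_than_val(arr, val):
--     # Divide-and-conquer on list slices: the answer within segment s is -1 if s
--     # is empty; otherwise split at the midpoint element and recurse on the left
--     # slice, or recurse on the right slice and shift its answer past the split.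
--     def g(s):
--         if not s:
--             return -1
--         k = (len(s) - 1) // 2
--         if s[k] >= val:
--             return g(s[:k])
--         return k + 1 + g(s[k + 1:])
--     return g(arr)
-- ===== Notes on version B (the rewrite author's own statement) =====
-- stated objective: alternative
-- what changed: Replaces A's iterative while-loop over integer bounds (l, r) with a redundant res accumulator by a recursive divide-and-conquer over list slices that carries no bounds or accumulator at all: it splits the segment at its midpoint, recurses on the left or right slice, and shifts the right-slice answer by the split offset.
import Mathlib
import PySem

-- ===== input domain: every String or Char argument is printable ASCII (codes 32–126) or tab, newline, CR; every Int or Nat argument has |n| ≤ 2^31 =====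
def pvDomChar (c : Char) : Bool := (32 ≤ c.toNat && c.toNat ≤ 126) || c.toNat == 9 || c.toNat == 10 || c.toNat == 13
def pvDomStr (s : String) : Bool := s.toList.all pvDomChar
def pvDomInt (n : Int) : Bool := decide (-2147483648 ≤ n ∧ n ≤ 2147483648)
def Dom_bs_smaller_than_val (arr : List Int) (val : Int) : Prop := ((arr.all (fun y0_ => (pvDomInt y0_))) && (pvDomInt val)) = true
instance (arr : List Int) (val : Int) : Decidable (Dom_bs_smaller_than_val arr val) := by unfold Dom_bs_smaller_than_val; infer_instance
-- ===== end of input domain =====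

-- B replaces A's iterative (l, r, res) bounds loop by a recursive divide-and-conquer
-- over list slices with no bounds or accumulator (objective: alternative).

-- ===== PORT A =====
-- A's while loop as structural recursion over its state (l, r, res).
-- arr[m] is always in range when l ≤ r (0 ≤ l ≤ m ≤ r < arr.length), so pyGetD's default is never used.
def bsLoopA (arr : List Int) (val l r res : Int) : Int :=
  if l ≤ r then
    let m := PySem.Int.floordiv (l + r) 2
    if PySem.List.pyGetD arr m 0 ≥ val then bsLoopA arr val l (m - 1) (m - 1)
    else bsLoopA arr val (m + 1) r res
  else res
termination_by (r - l + 1).toNat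
decreasing_by
  · have h := PySem.Int.floordiv_two_mid_bounds (by omega : l ≤ r); omega
  · have h := PySem.Int.floordiv_two_mid_bounds (by omega : l ≤ r); omega

def bs_smaller_than_val (arr : List Int) (val : Int) : Int :=
  bsLoopA arr val 0 ((arr.length : Int) - 1) ((arr.length : Int) - 1)

-- ===== PORT B =====
-- B's helper g: recursion on the list segment itself; s[k] is in range since s ≠ [].
def bsG (val : Int) (s : List Int) : Int :=
  if s.length = 0 then -1
  else
    let k := PySem.Int.floordiv ((s.length : Int) - 1) 2
    if PySem.List.pyGetD s k 0 ≥ val then bsG val (PySem.List.slice s none (some k))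
    else k + 1 + bsG val (PySem.List.slice s (some (k + 1)) none)
termination_by s.length
decreasing_by
  · have h := PySem.Int.floordiv_two_mid_bounds
      (by omega : (0:Int) ≤ (s.length : Int) - 1)
    simp only [zero_add] at h
    rw [PySem.List.slice_to s (by omega)]
    simp only [List.length_take]
    omega
  · have h := PySem.Int.floordiv_two_mid_bounds
      (by omega : (0:Int) ≤ (s.length : Int) - 1)
    simp only [zero_add] at h
    rw [PySem.List.slice_from s (by omega)]
    simp only [List.length_drop]
    omega

def bs_smaller_than_val_alt (arr : List Int) (val : Int) : Int :=
  bsG val arr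

-- ===== PRECONDITION & SPEC =====
def Spec_bs_smaller_than_val (arr : List Int) (val : Int) (out : Int) : Prop := out = bs_smaller_than_val_alt arr val
instance (arr : List Int) (val : Int) (out : Int) : Decidable (Spec_bs_smaller_than_val arr val out) := by unfold Spec_bs_smaller_than_val; infer_instance

-- ===== CLAIM (what is proved, stated in full; the proofs are below) =====
def Claim_equal_bs_smaller_than_val : Prop := ∀ (arr : List Int) (val : Int), Dom_bs_smaller_than_val arr val → Spec_bs_smaller_than_val arr val (bs_smaller_than_val arr val)

-- ===== LEMMAS AND PROOFS =====

-- Invariant: A's loop on interval [l, r] (with res = r, l - 1 ≤ r, in bounds)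
-- computes l plus B's recursion on the segment arr[l .. r].
theorem bsLoopA_eq_bsG (arr : List Int) (val : Int) :
    ∀ l r res : Int, res = r → 0 ≤ l → l - 1 ≤ r → r < (arr.length : Int) →
      bsLoopA arr val l r res =
        l + bsG val ((arr.drop l.toNat).take (r + 1 - l).toNat) := by
  intro l r res
  induction l, r, res using bsLoopA.induct arr val with
  | case1 l r res hle m hge ih =>
    intro hres hl hlr hr
    have hm := PySem.Int.floordiv_two_mid_bounds hle
    have hfd : ∀ x : Int, PySem.Int.floordiv x 2 = x / 2 :=
      fun x => PySem.Int.floordiv_eq_ediv_of_pos (by omega)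
    set seg := (arr.drop l.toNat).take (r + 1 - l).toNat with hseg
    have hseglen : seg.length = (r + 1 - l).toNat := by
      simp only [hseg, List.length_take, List.length_drop]; omega
    have hk : PySem.Int.floordiv ((seg.length : Int) - 1) 2 = m - l := by
      rw [hseglen, hfd, show m = (l + r) / 2 from hfd (l + r)]; omega
    have hml0 : 0 ≤ m - l := by omega
    have hmlt : m - l < (seg.length : Int) := by rw [hseglen]; omega
    have hget : PySem.List.pyGetD seg (m - l) 0 = PySem.List.pyGetD arr m 0 := by
      rw [PySem.List.pyGetD_eq_getElem seg 0 hml0 hmlt,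
          PySem.List.pyGetD_eq_getElem arr 0 (by omega) (by omega)]
      simp only [hseg, List.getElem_take, List.getElem_drop]
      congr 1; omega
    rw [bsLoopA]
    simp only [if_pos hle]
    rw [if_pos hge]
    conv_rhs => rw [bsG]
    rw [if_neg (by omega)]
    have hslice2 : PySem.List.slice seg none (some (m - l)) =
        (arr.drop l.toNat).take ((m - 1) + 1 - l).toNat := by
      rw [PySem.List.slice_to seg hml0, hseg, List.take_take]
      congr 1; omega
    simp only [hk, hget, if_pos hge, hslice2]
    exact ih rfl hl (by omega) (by omega)
  | case2 l r res hle m hge ih =>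
    intro hres hl hlr hr
    have hm := PySem.Int.floordiv_two_mid_bounds hle
    have hfd : ∀ x : Int, PySem.Int.floordiv x 2 = x / 2 :=
      fun x => PySem.Int.floordiv_eq_ediv_of_pos (by omega)
    set seg := (arr.drop l.toNat).take (r + 1 - l).toNat with hseg
    have hseglen : seg.length = (r + 1 - l).toNat := by
      simp only [hseg, List.length_take, List.length_drop]; omega
    have hk : PySem.Int.floordiv ((seg.length : Int) - 1) 2 = m - l := by
      rw [hseglen, hfd, show m = (l + r) / 2 from hfd (l + r)]; omega
    have hml0 : 0 ≤ m - l := by omega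
    have hmlt : m - l < (seg.length : Int) := by rw [hseglen]; omega
    have hget : PySem.List.pyGetD seg (m - l) 0 = PySem.List.pyGetD arr m 0 := by
      rw [PySem.List.pyGetD_eq_getElem seg 0 hml0 hmlt,
          PySem.List.pyGetD_eq_getElem arr 0 (by omega) (by omega)]
      simp only [hseg, List.getElem_take, List.getElem_drop]
      congr 1; omega
    rw [bsLoopA]
    simp only [if_pos hle]
    rw [if_neg hge]
    conv_rhs => rw [bsG]
    rw [if_neg (by omega)]
    have hm2 : l ≤ m ∧ m ≤ r := hm
    have hslice : PySem.List.slice seg (some (m - l + 1)) =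
        (arr.drop (m + 1).toNat).take (r + 1 - (m + 1)).toNat := by
      rw [PySem.List.slice_from seg (by omega), hseg, List.drop_take, List.drop_drop]
      have h1 : l.toNat + (m - l + 1).toNat = (m + 1).toNat := by omega
      have h2 : (r + 1 - l).toNat - (m - l + 1).toNat = (r + 1 - (m + 1)).toNat := by omega
      rw [h1, h2]
    simp only [hk, hget, if_neg hge, hslice]
    have hIH := ih hres (by omega) (by omega) hr
    show bsLoopA arr val (m + 1) r res = _
    rw [hIH]
    ring
  | case3 l r res hle =>
    intro hres hl hlr hr
    have hempty : (r + 1 - l).toNat = 0 := by omega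
    rw [bsLoopA]
    rw [if_neg hle]
    rw [hempty]
    simp only [List.take_zero]
    simp [bsG]
    omega

-- ===== VERDICT =====
theorem bs_smaller_than_val_spec : Claim_equal_bs_smaller_than_val := by
  intro arr val _
  unfold Spec_bs_smaller_than_val bs_smaller_than_val bs_smaller_than_val_alt
  rw [bsLoopA_eq_bsG arr val 0 _ _ rfl (by omega) (by omega) (by omega)]
  simp
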